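-- pv_equiv track=rewrite | github.com/cynful/Google-Code-Jam | 2019/Round1A/AlienRhyme/alex.py | consider_words
-- ===== SOURCE A (Python) =====
-- def consider_words(words, index):
--     count = 0
--     word_map = {}
--     for word in words:
--         if index > len(word):
--             continue
--         last_char = word[-1*index]
--         if last_char in word_map:
--             word_map[last_char].append(word)
--         else:
--             word_map[last_char] = [word]
--
--     for last_char in word_map.keys():
--         lengt = len(word_map[last_char])
--         if lengt > 2:
--             res = consider_words(word_map[last_char], index+1)
--             if lengt - res >= 2:
--                 count += 2
--             count += res
--
--         elif lengt == 2:
--             count += 2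
--
--     return count
-- ===== SOURCE B (Python) =====
-- def _solve(grp):
--     # grp: sequences (tuples of chars); returns (paired_count, leftover_count)
--     tails = [s[1:] for s in grp]
--     ends = sum(1 for t in tails if not t)
--     a, l = _groups([t for t in tails if t])
--     if ends + l >= 2:
--         return a + 2, ends + l - 2
--     return a, ends + l
--
--
-- def _groups(live):
--     # partition live by first character (first-occurrence order); sum results
--     ans = 0
--     left = 0
--     while live:
--         h = live[0][0]
--         a, l = _solve([s for s in live if s[0] == h])
--         live = [s for s in live if s[0] != h]
--         ans += a
--         left += l
--     return ans, left
--
--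
-- def consider_words(words, index):
--     seqs = [tuple(reversed(w[:len(w) - index + 1])) for w in words if len(w) >= index]
--     return _groups(seqs)[0]
-- ===== Notes on version B (the rewrite author's own statement) =====
-- stated objective: alternative
-- what changed: B precomputes each eligible word's reversed suffix-extension sequence once and runs a single recursive partition (group-by-leading-char via filters) that threads an explicit (paired, leftover) pair upward, instead of A's per-level dict rebuilding with negative indexing, the size-2 shortcut and the recount-via-res test.
-- outside the precondition, e.g. on consider_words(['ab', 'ac'], 0): A returns 2, B returns 0
import Mathlib
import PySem

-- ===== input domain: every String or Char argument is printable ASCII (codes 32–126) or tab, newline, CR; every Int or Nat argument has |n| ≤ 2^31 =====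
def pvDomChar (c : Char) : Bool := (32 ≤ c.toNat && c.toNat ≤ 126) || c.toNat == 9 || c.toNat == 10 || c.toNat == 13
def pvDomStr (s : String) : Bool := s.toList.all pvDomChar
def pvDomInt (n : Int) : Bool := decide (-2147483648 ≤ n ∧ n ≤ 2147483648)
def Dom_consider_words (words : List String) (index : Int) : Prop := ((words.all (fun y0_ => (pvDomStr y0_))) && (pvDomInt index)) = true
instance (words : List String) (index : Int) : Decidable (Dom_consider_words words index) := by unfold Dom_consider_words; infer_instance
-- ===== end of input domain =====

-- B is an alternative implementation: one precomputed reversed-suffix sequence per word,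
-- then a recursive filter-partition that threads an explicit (paired, leftover) pair.

-- ===== PORT A =====
-- first loop of A: build the dict {last_char: [words]} (word[-1*index] via pyGet?; none is
-- the IndexError case, excluded by Pre_, the word is skipped there)
def buildMap (words : List String) (index : Int) : PySem.Dict Char (List String) :=
  words.foldl (fun wm word =>
    if index > PySem.Str.len word then wm
    else
      match PySem.Str.pyGet? word (-1 * index) with
      | none => wm
      | some c =>
        if wm.contains c then wm.insert c (wm.getD c [] ++ [word])
        else wm.insert c [word]) PySem.Dict.empty

mutual
-- fuel-guarded recursion (fuel only makes the recursion structural; it is large enough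
-- on every input, see `consider_words`)
def goA (fuel : Nat) (words : List String) (index : Int) : Int :=
  match fuel with
  | 0 => 0
  | n + 1 =>
    let wm := buildMap words index
    goKeys n wm wm.keys index
termination_by (fuel, 0)
-- second loop of A, over the dict keys
def goKeys (fuel : Nat) (wm : PySem.Dict Char (List String)) (keys : List Char) (index : Int) : Int :=
  match keys with
  | [] => 0
  | k :: rest =>
    let g := wm.getD k []
    let lengt : Int := g.length
    let count : Int :=
      if lengt > 2 then
        let res := goA fuel g (index + 1)
        (if lengt - res ≥ 2 then 2 else 0) + res
      else if lengt = 2 then 2 else 0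
    count + goKeys fuel wm rest index
termination_by (fuel, keys.length + 1)
end

def consider_words (words : List String) (index : Int) : Int :=
  goA ((words.foldl (fun m w => max m (PySem.Str.len w)) 0 + 2 - index).toNat) words index

-- ===== PORT B =====
-- sum of (len+1) over a list of sequences; termination measure for the mutual pair
def seqMu (l : List (List Char)) : Nat := (l.map (fun s => s.length + 1)).sum

@[simp] theorem seqMu_cons (s : List Char) (l : List (List Char)) :
    seqMu (s :: l) = s.length + 1 + seqMu l := by simp [seqMu]

theorem seqMu_filter_le (p : List Char → Bool) (l : List (List Char)) :
    seqMu (l.filter p) ≤ seqMu l := by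
  induction l with
  | nil => simp [seqMu]
  | cons s t ih =>
    rw [List.filter_cons]
    by_cases h : p s
    · rw [if_pos h]; simp; omega
    · rw [if_neg h]; simp; omega

theorem seqMu_tails_le (g : List (List Char)) :
    seqMu ((g.map (fun s => s.drop 1)).filter (fun t => !t.isEmpty)) + g.length ≤ seqMu g := by
  induction g with
  | nil => simp
  | cons s t ih =>
    rw [List.map_cons, List.filter_cons]
    by_cases h : s.drop 1 = []
    · rw [if_neg (by simp [h])]
      simp only [seqMu_cons, List.length_cons]
      omega
    · rw [if_pos (by simpa using h)]
      have hl : (s.drop 1).length + 1 ≤ s.length := by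
        cases s with
        | nil => simp at h
        | cons a b => simp
      simp only [seqMu_cons, List.length_cons]
      omega

mutual
def bSolve (grp : List (List Char)) : Int × Int :=
  let tails := grp.map (fun s => s.drop 1)
  let ends : Int := (tails.filter (fun t => t.isEmpty)).length
  if hg : grp.isEmpty then (0, 0)   -- never reached from Python (the loop only forms non-empty groups)
  else
    let al := bGroups (tails.filter (fun t => !t.isEmpty))
    if ends + al.2 ≥ 2 then (al.1 + 2, ends + al.2 - 2) else (al.1, ends + al.2)
termination_by 2 * seqMu grp + 1
decreasing_by
  simp only [List.map_subtype, List.unattach_attach]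
  have h1 : seqMu ((grp.map (List.drop 1)).filter (fun t => !t.isEmpty)) + grp.length ≤ seqMu grp := seqMu_tails_le grp
  have h2 : 1 ≤ grp.length := by
    cases grp with
    | nil => simp at hg
    | cons a b => simp
  omega
def bGroups (live : List (List Char)) : Int × Int :=
  match hlive : live with
  | [] => (0, 0)
  | s :: rest2 =>
    match s with
    | [] => (0, 0)   -- never reached from Python (live sequences are non-empty)
    | h :: _ =>
      let al := bSolve (live.filter (fun t => t.headD ' ' == h))
      let br := bGroups (live.filter (fun t => !(t.headD ' ' == h)))
      (al.1 + br.1, al.2 + br.2)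
termination_by 2 * seqMu live + 2
decreasing_by
  · have h1 := seqMu_filter_le (fun t => t.headD ' ' == h) live
    rw [← hlive]
    omega
  · rw [← hlive]
    rw [hlive, List.filter_cons]
    have h1 := seqMu_filter_le (fun t => !(t.headD ' ' == h)) rest2
    simp only [List.headD_cons, beq_self_eq_true, Bool.not_true, Bool.false_eq_true, if_false, seqMu_cons]
    omega
end

def seqOf (w : String) (index : Int) : List Char :=
  (PySem.Str.slice w none (some (PySem.Str.len w - index + 1))).toList.reverse

def consider_words_alt (words : List String) (index : Int) : Int :=
  (bGroups ((words.filter (fun w => index ≤ PySem.Str.len w)).map (fun w => seqOf w index))).1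

-- ===== PRECONDITION & SPEC =====
-- Pre_ excludes index < 1: there word[-1*index] indexes from the FRONT of the word (or
-- raises IndexError on a short word), an accident of Python's negative-index arithmetic
-- that this Code Jam helper is never called with (it is always called with index ≥ 1).
def Pre_consider_words (words : List String) (index : Int) : Prop := 1 ≤ index
instance (words : List String) (index : Int) : Decidable (Pre_consider_words words index) := by
  unfold Pre_consider_words; infer_instance

def pvWitness_consider_words : List String × Int := (["ab", "cb", "db", "xy"], 1)

def Spec_consider_words (words : List String) (index : Int) (out : Int) : Prop := out = consider_words_alt words index
instance (words : List String) (index : Int) (out : Int) : Decidable (Spec_consider_words words index out) := by unfold Spec_consider_words; infer_instance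

-- ===== CLAIM (what is proved, stated in full; the proofs are below) =====
def Claim_equal_consider_words : Prop := ∀ (words : List String) (index : Int), Dom_consider_words words index → Pre_consider_words words index → Spec_consider_words words index (consider_words words index)

-- ===== LEMMAS AND PROOFS =====

-- unfolding equations for the ports
theorem goA_zero (words : List String) (i : Int) : goA 0 words i = 0 := by
  rw [goA]

theorem goA_succ (n : Nat) (words : List String) (i : Int) :
    goA (n + 1) words i = goKeys n (buildMap words i) (buildMap words i).keys i := by
  rw [goA]

theorem goKeys_nil (n : Nat) (wm : PySem.Dict Char (List String)) (i : Int) :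
    goKeys n wm [] i = 0 := by
  rw [goKeys]

theorem goKeys_cons (n : Nat) (wm : PySem.Dict Char (List String)) (k : Char)
    (rest : List Char) (i : Int) :
    goKeys n wm (k :: rest) i =
      (if ((wm.getD k []).length : Int) > 2 then
        (if ((wm.getD k []).length : Int) - goA n (wm.getD k []) (i + 1) ≥ 2 then 2 else 0)
          + goA n (wm.getD k []) (i + 1)
      else if ((wm.getD k []).length : Int) = 2 then 2 else 0) + goKeys n wm rest i := by
  rw [goKeys]

theorem bGroups_nil : bGroups [] = (0, 0) := by rw [bGroups]

theorem bGroups_cons (h : Char) (s' : List Char) (rest2 : List (List Char)) :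
    bGroups ((h :: s') :: rest2) =
      (let al := bSolve (((h :: s') :: rest2).filter (fun t => t.headD ' ' == h))
       let br := bGroups (((h :: s') :: rest2).filter (fun t => !(t.headD ' ' == h)))
       (al.1 + br.1, al.2 + br.2)) := by
  rw [bGroups]

theorem bSolve_eq (grp : List (List Char)) (hne : grp ≠ []) :
    bSolve grp =
      (let tails := grp.map (fun s => s.drop 1)
       let ends : Int := (tails.filter (fun t => t.isEmpty)).length
       let al := bGroups (tails.filter (fun t => !t.isEmpty))
       if ends + al.2 ≥ 2 then (al.1 + 2, ends + al.2 - 2) else (al.1, ends + al.2)) := by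
  rw [bSolve]
  simp [List.isEmpty_iff, hne]

-- leftover = size - paired, for the B-side pair
theorem b_snd (N : Nat) :
    (∀ grp : List (List Char), 2 * seqMu grp + 1 ≤ N →
      (bSolve grp).2 = (grp.length : Int) - (bSolve grp).1) ∧
    (∀ live : List (List Char), 2 * seqMu live + 2 ≤ N → (∀ t ∈ live, t ≠ []) →
      (bGroups live).2 = (live.length : Int) - (bGroups live).1) := by
  induction N using Nat.strong_induction_on with
  | _ N IH =>
    constructor
    · intro grp hle
      cases hgrp : grp with
      | nil => rw [bSolve]; simp
      | cons s rest =>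
        subst hgrp
        rw [bSolve_eq (s :: rest) (by simp)]
        simp only
        set tails := (s :: rest).map (fun s => s.drop 1) with htails
        set live := tails.filter (fun t => !t.isEmpty) with hlivedef
        have hlivene : ∀ t ∈ live, t ≠ [] := by
          intro t ht
          have := (List.mem_filter.mp ht).2
          simpa [List.isEmpty_iff] using this
        have hmu : seqMu live + (s :: rest).length ≤ seqMu (s :: rest) := seqMu_tails_le _
        have hlen : 1 ≤ (s :: rest).length := by simp
        have h2 := (IH (2 * seqMu live + 2) (by omega)).2 live le_rfl hlivene
        have hsplit : (tails.filter (fun t => t.isEmpty)).length + live.length = tails.length := by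
          have hperm := List.filter_append_perm (fun t : List Char => t.isEmpty) tails
          have := hperm.length_eq
          simpa using this
        have hlen2 : tails.length = (s :: rest).length := by simp [htails]
        split <;> rename_i hif <;> dsimp only <;> push_cast at * <;> omega
    · intro live hle hne
      cases hlive : live with
      | nil => rw [bGroups_nil]; simp
      | cons s rest2 =>
        subst hlive
        cases hs : s with
        | nil => exact absurd rfl (hne [] (by simp [← hs]))
        | cons h s' =>
          subst hs
          rw [bGroups_cons]
          simp only
          set grp := ((h :: s') :: rest2).filter (fun t => t.headD ' ' == h) with hgrp
          set rest := ((h :: s') :: rest2).filter (fun t => !(t.headD ' ' == h)) with hrest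
          have hmu1 : seqMu grp ≤ seqMu ((h :: s') :: rest2) := seqMu_filter_le _ _
          have hmu2 : seqMu rest ≤ seqMu rest2 := by
            rw [hrest, List.filter_cons]
            simp only [List.headD_cons, beq_self_eq_true, Bool.not_true, Bool.false_eq_true,
              if_false]
            exact seqMu_filter_le _ _
          have hmu3 : seqMu ((h :: s') :: rest2) = (h :: s').length + 1 + seqMu rest2 := by simp
          have h1 := (IH (2 * seqMu grp + 1) (by omega)).1 grp le_rfl
          have h2 := (IH (2 * seqMu rest + 2) (by omega)).2 rest le_rfl
            (fun t ht => hne t (List.mem_of_mem_filter ht))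
          have hsplit : grp.length + rest.length = ((h :: s') :: rest2).length := by
            rw [hgrp, hrest]
            have hperm := List.filter_append_perm
              (fun t : List Char => t.headD ' ' == h) ((h :: s') :: rest2)
            have h3 := hperm.length_eq
            simp only [List.length_append] at h3
            exact h3
          push_cast at *
          omega

theorem bGroups_snd (live : List (List Char)) (h : ∀ t ∈ live, t ≠ []) :
    (bGroups live).2 = (live.length : Int) - (bGroups live).1 :=
  (b_snd (2 * seqMu live + 2)).2 live le_rfl h

-- groups of one or two sequences
theorem b_small (N : Nat) :
    (∀ s : List Char, 2 * seqMu [s] + 1 ≤ N → bSolve [s] = (0, 1)) ∧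
    (∀ s t : List Char, 2 * seqMu [s, t] + 1 ≤ N → bSolve [s, t] = (2, 0)) ∧
    (∀ s : List Char, 2 * seqMu [s] + 2 ≤ N → s ≠ [] → bGroups [s] = (0, 1)) ∧
    (∀ s t : List Char, 2 * seqMu [s, t] + 2 ≤ N → s ≠ [] → t ≠ [] →
      bGroups [s, t] = (2, 0) ∨ bGroups [s, t] = (0, 2)) := by
  induction N using Nat.strong_induction_on with
  | _ N IH =>
    refine ⟨?_, ?_, ?_, ?_⟩
    · -- bSolve [s] = (0, 1)
      intro s hle
      rw [bSolve_eq [s] (by simp)]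
      cases hd : s.tail with
      | nil => norm_num [hd, bGroups_nil]
      | cons c r =>
        have hlen : s.length = r.length + 2 := by
          cases s with
          | nil => simp at hd
          | cons a b => simp at hd; simp [hd]
        have hmu : 2 * seqMu [c :: r] + 2 < N := by
          simp [seqMu] at *; omega
        have hb := (IH _ hmu).2.2.1 (c :: r) le_rfl (by simp)
        simp [hd, hb]
    · -- bSolve [s, t] = (2, 0)
      intro s t hle
      rw [bSolve_eq [s, t] (by simp)]
      cases hds : s.tail with
      | nil =>
        cases hdt : t.tail with
        | nil => norm_num [hds, hdt, bGroups_nil]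
        | cons c r =>
          have hlent : t.length = r.length + 2 := by
            cases t with
            | nil => simp at hdt
            | cons a b => simp at hdt; simp [hdt]
          have hmu : 2 * seqMu [c :: r] + 2 < N := by
            simp [seqMu] at *; omega
          have hb := (IH _ hmu).2.2.1 (c :: r) le_rfl (by simp)
          norm_num [hds, hdt, hb, bGroups_nil]
      | cons c r =>
        have hlens : s.length = r.length + 2 := by
          cases s with
          | nil => simp at hds
          | cons a b => simp at hds; simp [hds]
        cases hdt : t.tail with
        | nil =>
          have hmu : 2 * seqMu [c :: r] + 2 < N := by
            simp [seqMu] at *; omega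
          have hb := (IH _ hmu).2.2.1 (c :: r) le_rfl (by simp)
          norm_num [hds, hdt, hb, bGroups_nil]
        | cons d q =>
          have hlent : t.length = q.length + 2 := by
            cases t with
            | nil => simp at hdt
            | cons a b => simp at hdt; simp [hdt]
          have hmu : 2 * seqMu [c :: r, d :: q] + 2 < N := by
            simp [seqMu] at *; omega
          have hb := (IH _ hmu).2.2.2 (c :: r) (d :: q) le_rfl (by simp) (by simp)
          rcases hb with hb | hb <;> norm_num [hds, hdt, hb, bGroups_nil]
    · -- bGroups [s] = (0, 1)
      intro s hle hne
      cases s with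
      | nil => exact absurd rfl hne
      | cons h s' =>
        rw [bGroups_cons h s' []]
        have hmu : 2 * seqMu [h :: s'] + 1 < N := by simp [seqMu] at *; omega
        have hb := (IH _ hmu).1 (h :: s') le_rfl
        norm_num [hb, bGroups_nil]
    · -- bGroups [s, t] = (2, 0) or (0, 2)
      intro s t hle hnes hnet
      cases s with
      | nil => exact absurd rfl hnes
      | cons h s' =>
        rw [bGroups_cons h s' [t]]
        by_cases hth0 : (t.headD ' ' == h) = true
        · have hth : t.head?.getD ' ' = h := by simpa using hth0
          have hmu : 2 * seqMu [h :: s', t] + 1 < N := by simp [seqMu] at *; omega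
          have hb := (IH _ hmu).2.1 (h :: s') t le_rfl
          have h1 : List.filter (fun u => u.headD ' ' == h) ((h :: s') :: [t]) = [h :: s', t] := by
            simp [List.filter_cons, hth]
          have h2 : List.filter (fun u => !(u.headD ' ' == h)) ((h :: s') :: [t]) = [] := by
            simp [List.filter_cons, hth]
          left
          rw [h1, h2, hb, bGroups_nil]
          norm_num
        · have hth : ¬ t.head?.getD ' ' = h := by simpa using hth0
          have hmu1 : 2 * seqMu [h :: s'] + 1 < N := by simp [seqMu] at *; omega
          have hb1 := (IH _ hmu1).1 (h :: s') le_rfl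
          have hmu2 : 2 * seqMu [t] + 2 < N := by simp [seqMu] at *; omega
          have hb2 := (IH _ hmu2).2.2.1 t le_rfl hnet
          have h1 : List.filter (fun u => u.headD ' ' == h) ((h :: s') :: [t]) = [h :: s'] := by
            simp [List.filter_cons, hth]
          have h2 : List.filter (fun u => !(u.headD ' ' == h)) ((h :: s') :: [t]) = [t] := by
            simp [List.filter_cons, hth]
          right
          rw [h1, h2, hb1, hb2]
          norm_num

theorem bSolve_one (s : List Char) : bSolve [s] = (0, 1) :=
  (b_small (2 * seqMu [s] + 1)).1 s le_rfl

theorem bSolve_two (s t : List Char) : bSolve [s, t] = (2, 0) :=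
  (b_small (2 * seqMu [s, t] + 1)).2.1 s t le_rfl

-- ordered-dedup facts
theorem discard_add (s : PySem.Set Char) (x c : Char) :
    (s.add x).discard c =
      if x == c then s.discard c else (s.discard c).add x := by
  by_cases hxc : x = c
  · subst hxc
    rw [if_pos (by simp)]
    simp only [PySem.Set.add, PySem.Set.discard]
    split
    · rfl
    · simp [List.filter_append]
  · rw [if_neg (by simpa using hxc)]
    simp only [PySem.Set.add, PySem.Set.discard]
    have hmem : PySem.Set.contains (List.filter (fun y => !y == c) s) x = PySem.Set.contains s x := by
      simp only [PySem.Set.contains]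
      by_cases hx : x ∈ s
      · have h1 : x ∈ List.filter (fun y => !y == c) s :=
          List.mem_filter.mpr ⟨hx, by simpa using hxc⟩
        simp [hx, h1]
      · have h1 : x ∉ List.filter (fun y => !y == c) s := fun h => hx (List.mem_filter.mp h).1
        simp [hx, h1]
    by_cases hs : PySem.Set.contains s x = true
    · rw [if_pos hs, hmem, if_pos hs]
    · rw [if_neg hs, hmem, if_neg hs, List.filter_append]
      simp [hxc]

theorem discard_foldl_add (c : Char) (l : List Char) :
    ∀ s : PySem.Set Char,
      (PySem.Set.discard (l.foldl PySem.Set.add s) c)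
        = (l.filter (fun y => !(y == c))).foldl PySem.Set.add (PySem.Set.discard s c) := by
  induction l with
  | nil => intro s; simp
  | cons x xs ih =>
    intro s
    rw [List.foldl_cons, ih, List.filter_cons]
    by_cases hxc : x = c
    · rw [if_neg (by simp [hxc]), discard_add]
      simp [hxc]
    · rw [if_pos (by simpa using hxc), List.foldl_cons, discard_add,
        if_neg (by simpa using hxc)]

theorem discard_ofList (c : Char) (l : List Char) :
    (PySem.Set.ofList l).discard c = PySem.Set.ofList (l.filter (fun y => !(y == c))) := by
  have h := discard_foldl_add c l PySem.Set.empty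
  simpa [PySem.Set.ofList, PySem.Set.empty, PySem.Set.discard] using h

-- the key character and the reversed-suffix sequence of a word
def keyOf (w : String) (i : Int) : Char := (PySem.Str.pyGet? w (-1 * i)).getD ' '

theorem keyOf_eq (w : String) (i : Int) (h1 : 1 ≤ i) (h2 : i ≤ PySem.Str.len w) :
    ∃ hlt : w.toList.length - i.toNat < w.toList.length,
      keyOf w i = w.toList[w.toList.length - i.toNat]'hlt := by
  have hL := PySem.Str.len_eq w
  have hk2 : i.toNat ≤ w.toList.length := by omega
  have hlt : w.toList.length - i.toNat < w.toList.length := by omega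
  refine ⟨hlt, ?_⟩
  unfold keyOf
  rw [show (-1 : Int) * i = -((i.toNat : Nat) : Int) by omega]
  have hp : PySem.Str.pyGet? w (-((i.toNat : Nat) : Int))
      = w.toList[w.toList.length - i.toNat]? := by
    have h := PySem.List.pyGet?_neg_natCast w.toList i.toNat (by omega) hk2
    simpa [PySem.Str.pyGet?, PySem.Chars.pyGet?] using h
  rw [hp, List.getElem?_eq_getElem hlt]
  rfl

theorem rev_take_succ (l : List Char) (n : Nat) (h : n < l.length) :
    (l.take (n + 1)).reverse = l[n] :: (l.take n).reverse := by
  rw [List.take_add_one, List.getElem?_eq_getElem h]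
  simp

theorem seqOf_take (w : String) (i : Int) (h0 : 0 ≤ PySem.Str.len w - i + 1) :
    seqOf w i = (w.toList.take ((PySem.Str.len w - i + 1).toNat)).reverse := by
  unfold seqOf
  rw [PySem.Str.toList_slice]
  have hs : PySem.Chars.slice w.toList none (some (PySem.Str.len w - i + 1))
      = w.toList.take ((PySem.Str.len w - i + 1).toNat) := by
    simpa [PySem.Chars.slice] using PySem.List.slice_to w.toList h0
  rw [hs]

theorem seqOf_eq (w : String) (i : Int) (h1 : 1 ≤ i) (h2 : i ≤ PySem.Str.len w) :
    seqOf w i = keyOf w i :: (w.toList.take (w.toList.length - i.toNat)).reverse := by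
  obtain ⟨hlt, hkey⟩ := keyOf_eq w i h1 h2
  have hL := PySem.Str.len_eq w
  rw [seqOf_take w i (by omega)]
  rw [show (PySem.Str.len w - i + 1).toNat = (w.toList.length - i.toNat) + 1 by omega]
  rw [rev_take_succ w.toList _ hlt, hkey]

theorem seqOf_ne_nil (w : String) (i : Int) (h1 : 1 ≤ i) (h2 : i ≤ PySem.Str.len w) :
    seqOf w i ≠ [] := by
  rw [seqOf_eq w i h1 h2]; simp

theorem headD_seqOf (w : String) (i : Int) (h1 : 1 ≤ i) (h2 : i ≤ PySem.Str.len w) :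
    (seqOf w i).headD ' ' = keyOf w i := by
  rw [seqOf_eq w i h1 h2]; simp

theorem drop_one_seqOf (w : String) (i : Int) (h1 : 1 ≤ i) (h2 : i ≤ PySem.Str.len w) :
    (seqOf w i).drop 1 = if i + 1 ≤ PySem.Str.len w then seqOf w (i + 1) else [] := by
  have hL := PySem.Str.len_eq w
  rw [seqOf_eq w i h1 h2]
  by_cases hc : i + 1 ≤ PySem.Str.len w
  · rw [if_pos hc]
    obtain ⟨hlt', hkey'⟩ := keyOf_eq w (i + 1) (by omega) hc
    rw [seqOf_eq w (i + 1) (by omega) hc, hkey']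
    have hn : w.toList.length - i.toNat = (w.toList.length - (i + 1).toNat) + 1 := by omega
    rw [List.drop_one, List.tail_cons, hn, rev_take_succ w.toList _ (by omega)]
  · rw [if_neg hc]
    have hn : w.toList.length - i.toNat = 0 := by omega
    rw [List.drop_one, List.tail_cons, hn]
    simp

theorem pyGet?_keyOf (w : String) (i : Int) (h1 : 1 ≤ i) (h2 : i ≤ PySem.Str.len w) :
    PySem.Str.pyGet? w (-1 * i) = some (keyOf w i) := by
  unfold keyOf
  cases hpg : PySem.Str.pyGet? w (-1 * i) with
  | some c => simp
  | none =>
    exfalso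
    have hL := PySem.Str.len_eq w
    have hnone : PySem.List.pyGet? w.toList (-1 * i) = none := by
      simpa [PySem.Str.pyGet?, PySem.Chars.pyGet?] using hpg
    have hni := (PySem.List.pyGet?_eq_none_iff (xs := w.toList) (i := -1 * i)).mp hnone
    apply hni
    unfold PySem.Raise.InRange
    omega

-- the first loop of A builds exactly the modify-fold over the eligible words
theorem build_gen (i : Int) (h1 : 1 ≤ i) :
    ∀ (words : List String) (d : PySem.Dict Char (List String)),
      words.foldl (fun wm word =>
        if i > PySem.Str.len word then wm
        else
          match PySem.Str.pyGet? word (-1 * i) with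
          | none => wm
          | some c =>
            if wm.contains c then wm.insert c (wm.getD c [] ++ [word])
            else wm.insert c [word]) d
      = ((words.filter (fun w => i ≤ PySem.Str.len w)).map (fun w => (keyOf w i, w))).foldl
          (fun d p => d.modify p.1 [] (fun x => x ++ [p.2])) d := by
  intro words
  induction words with
  | nil => intro d; simp
  | cons w ws ih =>
    intro d
    by_cases hw : i ≤ PySem.Str.len w
    · have hstep :
        (if i > PySem.Str.len w then d
         else
           match PySem.Str.pyGet? w (-1 * i) with
           | none => d
           | some c =>
             if d.contains c then d.insert c (d.getD c [] ++ [w])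
             else d.insert c [w])
        = d.modify (keyOf w i) [] (fun x => x ++ [w]) := by
        rw [if_neg (by omega), pyGet?_keyOf w i h1 hw]
        dsimp only
        by_cases hc : d.contains (keyOf w i) = true
        · rw [if_pos hc]; rfl
        · rw [if_neg hc]
          have hg := PySem.Dict.getD_of_not_contains d ([] : List String)
            (k := keyOf w i) (by simpa using hc)
          simp [PySem.Dict.modify, hg]
      simp only [List.foldl_cons, List.filter_cons,
        if_pos (show decide (i ≤ PySem.Str.len w) = true by simpa using hw),
        List.map_cons]
      rw [hstep, ih]
    · simp only [List.foldl_cons, List.filter_cons,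
        if_neg (show ¬ decide (i ≤ PySem.Str.len w) = true by simpa using hw)]
      rw [if_pos (show i > PySem.Str.len w by omega), ih]

theorem buildMap_eq (words : List String) (i : Int) (h1 : 1 ≤ i) :
    buildMap words i =
      (((words.filter (fun w => i ≤ PySem.Str.len w)).map (fun w => (keyOf w i, w))).foldl
        (fun d p => d.modify p.1 [] (fun x => x ++ [p.2])) PySem.Dict.empty) := by
  unfold buildMap
  exact build_gen i h1 words PySem.Dict.empty

theorem buildMap_getD (words : List String) (i : Int) (h1 : 1 ≤ i) (c : Char) :
    (buildMap words i).getD c [] =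
      (words.filter (fun w => i ≤ PySem.Str.len w)).filter (fun w => keyOf w i == c) := by
  rw [buildMap_eq words i h1, PySem.Dict.getD_foldl_modify_append]
  simp [List.filter_map, List.map_map, Function.comp_def]

theorem buildMap_keys (words : List String) (i : Int) (h1 : 1 ≤ i) :
    (buildMap words i).keys =
      PySem.Set.ofList ((words.filter (fun w => i ≤ PySem.Str.len w)).map (fun w => keyOf w i)) := by
  rw [buildMap_eq words i h1, PySem.Dict.keys_foldl_modify_key]
  simp [PySem.Dict.keys_empty, List.map_map, Function.comp_def,
    PySem.Set.update, PySem.Set.ofList, PySem.Set.empty]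

-- the per-group body of A's second loop
def fA (n : Nat) (g : List String) (i : Int) : Int :=
  if (g.length : Int) > 2 then
    (if (g.length : Int) - goA n g (i + 1) ≥ 2 then 2 else 0) + goA n g (i + 1)
  else if (g.length : Int) = 2 then 2 else 0

theorem goKeys_sum (n : Nat) (wm : PySem.Dict Char (List String)) (i : Int) :
    ∀ keys : List Char, goKeys n wm keys i = (keys.map (fun k => fA n (wm.getD k []) i)).sum := by
  intro keys
  induction keys with
  | nil => simp [goKeys_nil]
  | cons k rest ih => rw [goKeys_cons, ih]; simp [fA]

-- one group of A = one bSolve call of B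
theorem L_G (n : Nat)
    (IH : ∀ i words, 1 ≤ i → (∀ w ∈ words, PySem.Str.len w + 1 ≤ i + n) →
      goA n words i =
        (bGroups ((words.filter (fun w => i ≤ PySem.Str.len w)).map (fun w => seqOf w i))).1)
    (i : Int) (g : List String) (h1 : 1 ≤ i) (hne : g ≠ [])
    (helig : ∀ w ∈ g, i ≤ PySem.Str.len w ∧ PySem.Str.len w + 1 ≤ i + (n + 1)) :
    bSolve (g.map (fun w => seqOf w i)) = (fA n g i, (g.length : Int) - fA n g i) := by
  match g with
  | [] => exact absurd rfl hne
  | [w] =>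
    rw [List.map_singleton, bSolve_one]
    norm_num [fA]
  | [w1, w2] =>
    rw [show [w1, w2].map (fun w => seqOf w i) = [seqOf w1 i, seqOf w2 i] by simp,
      bSolve_two]
    norm_num [fA]
  | w1 :: w2 :: w3 :: gr =>
    set g := w1 :: w2 :: w3 :: gr with hgdef
    have hg3 : (g.length : Int) > 2 := by simp [hgdef]; push_cast; omega
    have hssne : g.map (fun w => seqOf w i) ≠ [] := by simp [hgdef]
    rw [bSolve_eq _ hssne]
    simp only
    -- tails
    have htails : (g.map (fun w => seqOf w i)).map (fun s => s.drop 1)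
        = g.map (fun w => if i + 1 ≤ PySem.Str.len w then seqOf w (i + 1) else []) := by
      rw [List.map_map]
      exact List.map_congr_left (fun w hw => by
        exact drop_one_seqOf w i h1 (helig w hw).1)
    rw [htails]
    -- ends and live
    have hends : (g.map (fun w => if i + 1 ≤ PySem.Str.len w then seqOf w (i + 1) else [])).filter
          (fun t => t.isEmpty)
        = (g.filter (fun w => !decide (i + 1 ≤ PySem.Str.len w))).map
            (fun w => if i + 1 ≤ PySem.Str.len w then seqOf w (i + 1) else []) := by
      rw [List.filter_map]
      congr 1
      refine List.filter_congr (fun w hw => ?_)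
      by_cases hc : i + 1 ≤ PySem.Str.len w
      · simp only [Function.comp_apply, if_pos hc, hc, decide_true, Bool.not_true]
        simp [List.isEmpty_iff, seqOf_ne_nil w (i + 1) (by omega) hc]
      · dsimp only [Function.comp_apply]
        rw [if_neg hc]
        have hL : PySem.Str.len w = (w.length : Int) := by simp [PySem.Str.len_eq]
        simp [hc]
        omega
    have hlive : (g.map (fun w => if i + 1 ≤ PySem.Str.len w then seqOf w (i + 1) else [])).filter
          (fun t => !t.isEmpty)
        = (g.filter (fun w => decide (i + 1 ≤ PySem.Str.len w))).map (fun w => seqOf w (i + 1)) := by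
      rw [List.filter_map]
      have hf : (g.filter ((fun t => !t.isEmpty) ∘ fun w => if i + 1 ≤ PySem.Str.len w then seqOf w (i + 1) else []))
          = g.filter (fun w => decide (i + 1 ≤ PySem.Str.len w)) := by
        refine List.filter_congr (fun w hw => ?_)
        dsimp only [Function.comp_apply]
        by_cases hc : i + 1 ≤ PySem.Str.len w
        · simp only [if_pos hc, hc, decide_true]
          simp [List.isEmpty_iff, seqOf_ne_nil w (i + 1) (by omega) hc]
        · dsimp only
          rw [if_neg hc]
          have hL : PySem.Str.len w = (w.length : Int) := by simp [PySem.Str.len_eq]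
          simp [hc]
          omega
      rw [hf]
      refine List.map_congr_left (fun w hw => ?_)
      have hc := of_decide_eq_true (List.mem_filter.mp hw).2
      rw [if_pos hc]
    rw [hends, hlive]
    -- the recursive call
    have hres : goA n g (i + 1)
        = (bGroups ((g.filter (fun w => decide (i + 1 ≤ PySem.Str.len w))).map
            (fun w => seqOf w (i + 1)))).1 := by
      have := IH (i + 1) g (by omega) (fun w hw => by have := (helig w hw).2; omega)
      simpa using this
    have hlivene : ∀ t ∈ (g.filter (fun w => decide (i + 1 ≤ PySem.Str.len w))).map
        (fun w => seqOf w (i + 1)), t ≠ [] := by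
      intro t ht
      obtain ⟨w, hw, rfl⟩ := List.mem_map.mp ht
      exact seqOf_ne_nil w (i + 1) (by omega) (of_decide_eq_true (List.mem_filter.mp hw).2)
    have hsnd := bGroups_snd _ hlivene
    have hcount : ((g.filter (fun w => !decide (i + 1 ≤ PySem.Str.len w))).length : Int)
        + ((g.filter (fun w => decide (i + 1 ≤ PySem.Str.len w))).map (fun w => seqOf w (i + 1))).length
        = (g.length : Int) := by
      have hperm := List.filter_append_perm (fun w => decide (i + 1 ≤ PySem.Str.len w)) g
      have h3 := hperm.length_eq
      simp only [List.length_append] at h3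
      simp only [List.length_map]
      push_cast
      omega
    unfold fA
    rw [if_pos hg3, hres]
    simp only [List.length_map]
    split <;> rename_i hcond <;>
      [rw [if_pos (by push_cast at *; omega)]; rw [if_neg (by push_cast at *; omega)]] <;>
      simp only [Prod.mk.injEq] <;> constructor <;> push_cast at * <;> omega

-- the whole second loop of A = B's partition loop
theorem L_main (n : Nat)
    (IH : ∀ i words, 1 ≤ i → (∀ w ∈ words, PySem.Str.len w + 1 ≤ i + n) →
      goA n words i =
        (bGroups ((words.filter (fun w => i ≤ PySem.Str.len w)).map (fun w => seqOf w i))).1)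
    (i : Int) (h1 : 1 ≤ i) :
    ∀ (m : Nat) (el : List String), el.length ≤ m →
      (∀ w ∈ el, i ≤ PySem.Str.len w ∧ PySem.Str.len w + 1 ≤ i + (n + 1)) →
      ((PySem.Set.ofList (el.map (fun w => keyOf w i))).map
        (fun k => fA n (el.filter (fun w => keyOf w i == k)) i)).sum
        = (bGroups (el.map (fun w => seqOf w i))).1 := by
  intro m
  induction m with
  | zero =>
    intro el hlen helig
    have hnil : el = [] := List.eq_nil_of_length_eq_zero (by omega)
    subst hnil
    simp [bGroups_nil, PySem.Set.ofList, PySem.Set.empty]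
  | succ m ihm =>
    intro el hlen helig
    cases el with
    | nil => simp [bGroups_nil, PySem.Set.ofList, PySem.Set.empty]
    | cons w0 el' =>
      have hw0 := helig w0 (by simp)
      -- decompose the ordered key set
      rw [List.map_cons, PySem.Set.ofList_cons, discard_ofList]
      have hkf : (el'.map (fun w => keyOf w i)).filter (fun y => !(y == keyOf w0 i))
          = (el'.filter (fun w => !(keyOf w i == keyOf w0 i))).map (fun w => keyOf w i) := by
        rw [List.filter_map]
        rfl
      rw [hkf, List.map_cons, List.sum_cons]
      -- the groups for the remaining keys do not see the first group's words
      set el'' := el'.filter (fun w => !(keyOf w i == keyOf w0 i)) with hel''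
      have hgrp_eq : ∀ k ∈ PySem.Set.ofList (el''.map (fun w => keyOf w i)),
          (w0 :: el').filter (fun w => keyOf w i == k) = el''.filter (fun w => keyOf w i == k) := by
        intro k hk
        have hkmem : k ∈ el''.map (fun w => keyOf w i) := (PySem.Set.mem_ofList _ _).mp hk
        obtain ⟨w, hwmem, rfl⟩ := List.mem_map.mp hkmem
        have hkne : ¬ (keyOf w0 i == keyOf w i) = true := by
          have := (List.mem_filter.mp hwmem).2
          simp at this ⊢
          exact fun he => this he.symm
        rw [List.filter_cons, if_neg (by simpa using hkne), hel'']
        rw [List.filter_filter]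
        refine (List.filter_congr (fun v _ => ?_)).symm
        by_cases hv : (keyOf v i == keyOf w i) = true
        · have : (keyOf v i == keyOf w0 i) = false := by
            simp at hv hkne ⊢
            rw [hv]
            exact fun he => hkne he.symm
          simp [hv, this]
        · simp [Bool.eq_false_iff.mpr hv]
      have hsum_eq : ((PySem.Set.ofList (el''.map (fun w => keyOf w i))).map
            (fun k => fA n ((w0 :: el').filter (fun w => keyOf w i == k)) i)).sum
          = ((PySem.Set.ofList (el''.map (fun w => keyOf w i))).map
            (fun k => fA n (el''.filter (fun w => keyOf w i == k)) i)).sum := by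
        congr 1
        exact List.map_congr_left (fun k hk => by rw [hgrp_eq k hk])
      rw [hsum_eq]
      have hlen'' : el''.length ≤ m := by
        have hfl := List.length_filter_le (fun w => !(keyOf w i == keyOf w0 i)) el'
        rw [← hel''] at hfl
        simp only [List.length_cons] at hlen
        omega
      have helig'' : ∀ w ∈ el'', i ≤ PySem.Str.len w ∧ PySem.Str.len w + 1 ≤ i + (↑n + 1) :=
        fun w hw => helig w (List.mem_cons_of_mem _ (List.mem_of_mem_filter hw))
      rw [ihm el'' hlen'' helig'']
      -- now the B side
      have hseq0 := seqOf_eq w0 i h1 hw0.1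
      have hmapfilter : ∀ (p : Char → Bool),
          (el'.map (fun w => seqOf w i)).filter (fun t => p (t.headD ' '))
            = (el'.filter (fun w => p (keyOf w i))).map (fun w => seqOf w i) := by
        intro p
        rw [List.filter_map]
        congr 1
        refine List.filter_congr (fun w hw => ?_)
        dsimp only [Function.comp_apply]
        rw [headD_seqOf w i h1 (helig w (List.mem_cons_of_mem _ hw)).1]
      rw [List.map_cons, hseq0, bGroups_cons]
      have hgrpB : ((keyOf w0 i :: (w0.toList.take (w0.toList.length - i.toNat)).reverse)
            :: el'.map (fun w => seqOf w i)).filter (fun t => t.headD ' ' == keyOf w0 i)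
          = ((w0 :: el').filter (fun w => keyOf w i == keyOf w0 i)).map (fun w => seqOf w i) := by
        rw [List.filter_cons, if_pos (by simp), List.filter_cons, if_pos (by simp),
          List.map_cons, ← hseq0]
        congr 1
        exact hmapfilter (fun c => c == keyOf w0 i)
      have hrestB : ((keyOf w0 i :: (w0.toList.take (w0.toList.length - i.toNat)).reverse)
            :: el'.map (fun w => seqOf w i)).filter (fun t => !(t.headD ' ' == keyOf w0 i))
          = el''.map (fun w => seqOf w i) := by
        rw [List.filter_cons, if_neg (by simp), hel'']
        exact hmapfilter (fun c => !(c == keyOf w0 i))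
      rw [hgrpB, hrestB]
      have hg0ne : (w0 :: el').filter (fun w => keyOf w i == keyOf w0 i) ≠ [] := by
        rw [List.filter_cons, if_pos (by simp)]
        simp
      have hL_G := L_G n IH i ((w0 :: el').filter (fun w => keyOf w i == keyOf w0 i)) h1 hg0ne
        (fun w hw => helig w (List.mem_of_mem_filter hw))
      rw [hL_G]

theorem mainA : ∀ (n : Nat) (i : Int) (words : List String), 1 ≤ i →
    (∀ w ∈ words, PySem.Str.len w + 1 ≤ i + n) →
    goA n words i =
      (bGroups ((words.filter (fun w => i ≤ PySem.Str.len w)).map (fun w => seqOf w i))).1 := by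
  intro n
  induction n with
  | zero =>
    intro i words h1 hfuel
    have hfil : words.filter (fun w => decide (i ≤ PySem.Str.len w)) = [] :=
      List.filter_eq_nil_iff.mpr (fun w hw => by
        have := hfuel w hw
        simp only [decide_eq_true_eq]
        push_cast at this
        intro hle
        omega)
    rw [goA_zero]
    rw [show words.filter (fun w => i ≤ PySem.Str.len w)
        = words.filter (fun w => decide (i ≤ PySem.Str.len w)) from rfl, hfil]
    rw [List.map_nil, bGroups_nil]
  | succ n ihn =>
    intro i words h1 hfuel
    rw [goA_succ, goKeys_sum, buildMap_keys words i h1]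
    have hfun : (fun k => fA n ((buildMap words i).getD k []) i)
        = fun k => fA n (((words.filter (fun w => i ≤ PySem.Str.len w)).filter
            (fun w => keyOf w i == k))) i := by
      funext k
      rw [buildMap_getD words i h1 k]
    rw [hfun]
    exact L_main n ihn i h1
      (words.filter (fun w => i ≤ PySem.Str.len w)).length
      (words.filter (fun w => i ≤ PySem.Str.len w)) le_rfl
      (fun w hw => ⟨by
          have := (List.mem_filter.mp hw).2
          simpa using this,
        by
          have := hfuel w (List.mem_of_mem_filter hw)
          push_cast
          omega⟩)

theorem foldl_max_init (ws : List String) :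
    ∀ a : Int, a ≤ ws.foldl (fun m v => max m (PySem.Str.len v)) a := by
  induction ws with
  | nil => intro a; simp
  | cons v vs ih => intro a; exact le_trans (le_max_left _ _) (ih _)

theorem foldl_max_mem (ws : List String) :
    ∀ (a : Int), ∀ w ∈ ws, PySem.Str.len w ≤ ws.foldl (fun m v => max m (PySem.Str.len v)) a := by
  induction ws with
  | nil => intro a w hw; simp at hw
  | cons v vs ih =>
    intro a w hw
    rcases List.mem_cons.mp hw with h | h
    · subst h
      exact le_trans (le_max_right _ _) (foldl_max_init vs _)
    · exact ih _ w h

-- ===== VERDICT (by name: the statement is the Claim_ definition above) =====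
theorem consider_words_spec : Claim_equal_consider_words := by
  intro words index _hdom hpre
  unfold Spec_consider_words consider_words consider_words_alt
  refine mainA _ index words hpre ?_
  intro w hw
  have h0 := foldl_max_init words 0
  have h1 := foldl_max_mem words 0 w hw
  omega
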